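-- pv_equiv track=rewrite | github.com/linex-cd/puf | min/util.py | yeast_encode
-- ===== SOURCE A (Python) =====
-- def yeast_encode(number):
--
-- 	alphabet='0123456789ABCDEFGHIJKLMNOPQRSTUVWXYZabcdefghijklmnopqrstuvwxyz-_';
-- 	length = 64;
-- 	map = {alphabet[i]: i for i in range(length)};
--
-- 	temp = "";
-- 	while True:
-- 		temp = alphabet[number % length] + temp;
-- 		number = int(number / length);
-- 		if number == 0:
-- 			break;
-- 		#endif
-- 	#endwhile
--
-- 	string = temp;
-- 	return string;
-- ===== SOURCE B (Python) =====
-- def yeast_encode(number):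
--     alphabet = '0123456789ABCDEFGHIJKLMNOPQRSTUVWXYZabcdefghijklmnopqrstuvwxyz-_'
--     digit = alphabet[number % 64]
--     q = int(number / 64)
--     if q == 0:
--         return digit
--     return yeast_encode(q) + digit
-- ===== Notes on version B (the rewrite author's own statement) =====
-- stated objective: simpler
-- what changed: Replaced A's while-loop that prepends digits to a string accumulator (and its unused char-to-index map dict) with a direct recursion on the quotient int(number/64) that appends the last digit, keeping the exact int(number/64) truncating division.
import Mathlib
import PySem

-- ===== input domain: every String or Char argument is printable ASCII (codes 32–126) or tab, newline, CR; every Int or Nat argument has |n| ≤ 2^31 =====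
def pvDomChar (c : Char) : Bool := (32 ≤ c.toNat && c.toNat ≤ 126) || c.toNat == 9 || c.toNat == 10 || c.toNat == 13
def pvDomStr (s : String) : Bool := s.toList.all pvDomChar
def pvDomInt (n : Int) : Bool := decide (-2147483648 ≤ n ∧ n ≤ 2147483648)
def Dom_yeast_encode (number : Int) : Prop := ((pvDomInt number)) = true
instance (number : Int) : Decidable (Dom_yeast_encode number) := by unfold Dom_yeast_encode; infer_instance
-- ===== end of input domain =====

-- B replaces A's accumulator while-loop (which also builds an unused char→index dict)
-- by a direct recursion on the quotient int(number/64); objective: simpler, same cost.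

-- the shared alphabet literal of both Pythons
def yeastAlphabet : List Char :=
  "0123456789ABCDEFGHIJKLMNOPQRSTUVWXYZabcdefghijklmnopqrstuvwxyz-_".toList

-- alphabet[number % 64]: the index 0 ≤ number % 64 < 64 is always in range, so pyGetD is exact
def yeastDigit (number : Int) : Char :=
  PySem.List.pyGetD yeastAlphabet (PySem.Int.mod number 64) ' '

-- termination of both recursions: |int(n/64)| < |n| whenever the quotient is nonzero
theorem yeast_tdiv_lt (n : Int) (h : PySem.Int.truncdiv n 64 ≠ 0) :
    (PySem.Int.truncdiv n 64).natAbs < n.natAbs := by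
  unfold PySem.Int.truncdiv at *
  have key : (n.tdiv 64).natAbs = n.natAbs / 64 := by rw [Int.natAbs_tdiv]; rfl
  have h1 : (n.tdiv 64).natAbs ≠ 0 := fun hz => h (Int.natAbs_eq_zero.mp hz)
  rw [key] at h1 ⊢
  omega

-- ===== PORT A =====
-- A's while loop, prepending each digit to the accumulator 'temp'.
-- A also builds 'map = {alphabet[i]: i ...}', which it never uses; it is omitted here.
-- int(number / 64) is exact float division truncated toward zero = PySem.Int.truncdiv
-- (exact for |number| ≤ 2^31, the stated domain).
def yeastLoopA (number : Int) (temp : List Char) : List Char :=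
  let temp' := yeastDigit number :: temp
  let number' := PySem.Int.truncdiv number 64
  if _h : number' = 0 then temp' else yeastLoopA number' temp'
termination_by number.natAbs
decreasing_by exact yeast_tdiv_lt number _h

def yeast_encode (number : Int) : String := String.mk (yeastLoopA number [])

-- ===== PORT B =====
-- Source B's recursion: q = int(number/64); digit alone if q == 0, else yeast_encode(q) + digit
def yeastRecB (number : Int) : List Char :=
  let q := PySem.Int.truncdiv number 64
  if _h : q = 0 then [yeastDigit number]
  else yeastRecB q ++ [yeastDigit number]
termination_by number.natAbs
decreasing_by exact yeast_tdiv_lt number _h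

def yeast_encode_alt (number : Int) : String := String.mk (yeastRecB number)

-- ===== PRECONDITION & SPEC =====
def Spec_yeast_encode (number : Int) (out : String) : Prop := out = yeast_encode_alt number
instance (number : Int) (out : String) : Decidable (Spec_yeast_encode number out) := by unfold Spec_yeast_encode; infer_instance

-- ===== CLAIM (what is proved, stated in full; the proofs are below) =====
def Claim_equal_yeast_encode : Prop := ∀ (number : Int), Dom_yeast_encode number → Spec_yeast_encode number (yeast_encode number)

-- ===== LEMMAS AND PROOFS =====
-- loop invariant: A's accumulator loop equals B's recursion followed by the accumulator
theorem yeastLoopA_eq (number : Int) (temp : List Char) :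
    yeastLoopA number temp = yeastRecB number ++ temp := by
  rw [yeastLoopA, yeastRecB]
  by_cases h : PySem.Int.truncdiv number 64 = 0
  · simp [h]
  · simp only [h, dite_false]
    rw [yeastLoopA_eq (PySem.Int.truncdiv number 64) (yeastDigit number :: temp)]
    simp
termination_by number.natAbs
decreasing_by exact yeast_tdiv_lt number h

-- ===== VERDICT (by name: the statement is the Claim_ definition above) =====
theorem yeast_encode_spec : Claim_equal_yeast_encode := by
  intro number _
  unfold Spec_yeast_encode yeast_encode yeast_encode_alt
  rw [yeastLoopA_eq]
  simp
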